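-- pv_equiv track=rewrite | github.com/Rodriguespn/braintrust-agent-eval | evals/mcp-or-cli-evals/charts/mcp_vs_cli_chart.py | group_by_scenario
-- ===== SOURCE A (Python) =====
-- SCENARIO_BASELINE = "Baseline\n(no skills)"
--
-- SCENARIO_20_TOOLS = "Skills +\n20 Tools"
--
-- SCENARIO_8_TOOLS = "Skills +\n8 Tools"
--
-- SCENARIO_7_TOOLS = "Skills +\n7 Tools"
--
-- def classify_scenario(entry: dict) -> str:
--     if entry.get("baseline", False):
--         return SCENARIO_BASELINE
--     tool_count = entry.get("mcp_tool_count")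
--     if tool_count is not None and int(tool_count) == 8:
--         return SCENARIO_8_TOOLS
--     if tool_count is not None and int(tool_count) == 7:
--         return SCENARIO_7_TOOLS
--     return SCENARIO_20_TOOLS
--
-- def group_by_scenario(data: list[dict]) -> dict[str, list[dict]]:
--     groups: dict[str, list[dict]] = {
--         SCENARIO_BASELINE: [],
--         SCENARIO_20_TOOLS: [],
--         SCENARIO_8_TOOLS: [],
--         SCENARIO_7_TOOLS: [],
--     }
--     for entry in data:
--         groups[classify_scenario(entry)].append(entry)
--     return groups
-- ===== SOURCE B (Python) =====
-- SCENARIO_BASELINE = "Baseline\n(no skills)"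
--
-- SCENARIO_20_TOOLS = "Skills +\n20 Tools"
--
-- SCENARIO_8_TOOLS = "Skills +\n8 Tools"
--
-- SCENARIO_7_TOOLS = "Skills +\n7 Tools"
--
-- def classify_scenario(entry: dict) -> str:
--     if entry.get("baseline", False):
--         return SCENARIO_BASELINE
--     tool_count = entry.get("mcp_tool_count")
--     if tool_count is not None and int(tool_count) == 8:
--         return SCENARIO_8_TOOLS
--     if tool_count is not None and int(tool_count) == 7:
--         return SCENARIO_7_TOOLS
--     return SCENARIO_20_TOOLS
--
-- def group_by_scenario(data: list[dict]) -> dict[str, list[dict]]: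
--     # four separate filtering passes, one per scenario label
--     return {
--         label: [e for e in data if classify_scenario(e) == label]
--         for label in (SCENARIO_BASELINE, SCENARIO_20_TOOLS, SCENARIO_8_TOOLS, SCENARIO_7_TOOLS)
--     }
-- ===== Notes on version B (the rewrite author's own statement) =====
-- stated objective: alternative
-- what changed: B replaces A's single dispatching loop that appends each entry into a pre-initialized mutable bucket dict with a dict comprehension doing four independent filtering passes, one per scenario label.
import Mathlib
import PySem

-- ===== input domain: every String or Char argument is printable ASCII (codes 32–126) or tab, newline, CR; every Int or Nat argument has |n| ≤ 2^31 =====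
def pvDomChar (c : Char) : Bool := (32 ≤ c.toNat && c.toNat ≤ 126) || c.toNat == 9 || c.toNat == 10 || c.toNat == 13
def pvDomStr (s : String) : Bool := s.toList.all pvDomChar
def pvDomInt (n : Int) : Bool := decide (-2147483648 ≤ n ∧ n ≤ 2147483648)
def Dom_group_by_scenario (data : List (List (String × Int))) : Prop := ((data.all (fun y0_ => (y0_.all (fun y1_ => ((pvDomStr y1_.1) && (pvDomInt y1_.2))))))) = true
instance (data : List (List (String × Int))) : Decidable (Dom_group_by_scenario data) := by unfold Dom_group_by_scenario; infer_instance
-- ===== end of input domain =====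

-- B groups by four independent filtering passes (one per label) instead of A's single
-- dispatching loop into a pre-initialized mutable bucket dict; alternative decomposition, same cost class.

def SCENARIO_BASELINE : String := "Baseline\n(no skills)"
def SCENARIO_20_TOOLS : String := "Skills +\n20 Tools"
def SCENARIO_8_TOOLS : String := "Skills +\n8 Tools"
def SCENARIO_7_TOOLS : String := "Skills +\n7 Tools"

-- shared helper (identical in Source A and Source B); entries are dicts str -> int, so the
-- truthiness of entry.get("baseline", False) is "present and nonzero", and int() is identity
def classify_scenario (entry : List (String × Int)) : String :=
  if (PySem.Dict.mk entry).getD "baseline" 0 ≠ 0 then SCENARIO_BASELINE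
  else
    let tool_count := (PySem.Dict.mk entry).get? "mcp_tool_count"
    if tool_count.isSome ∧ tool_count.getD 0 = 8 then SCENARIO_8_TOOLS
    else if tool_count.isSome ∧ tool_count.getD 0 = 7 then SCENARIO_7_TOOLS
    else SCENARIO_20_TOOLS

-- ===== PORT A =====
def group_by_scenario (data : List (List (String × Int))) : List (String × List (List (String × Int))) :=
  let groups : PySem.Dict String (List (List (String × Int))) :=
    ((((PySem.Dict.empty).insert SCENARIO_BASELINE []).insert SCENARIO_20_TOOLS []).insert
        SCENARIO_8_TOOLS []).insert SCENARIO_7_TOOLS []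
  (data.foldl (fun g e => g.modify (classify_scenario e) [] (· ++ [e])) groups).items

-- ===== PORT B =====
def group_by_scenario_alt (data : List (List (String × Int))) : List (String × List (List (String × Int))) :=
  [SCENARIO_BASELINE, SCENARIO_20_TOOLS, SCENARIO_8_TOOLS, SCENARIO_7_TOOLS].map
    (fun label => (label, data.filter (fun e => classify_scenario e == label)))

-- ===== PRECONDITION & SPEC =====
def Spec_group_by_scenario (data : List (List (String × Int))) (out : List (String × List (List (String × Int)))) : Prop := out = group_by_scenario_alt data
instance (data : List (List (String × Int))) (out : List (String × List (List (String × Int)))) : Decidable (Spec_group_by_scenario data out) := by unfold Spec_group_by_scenario; infer_instance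

-- ===== CLAIM (what is proved, stated in full; the proofs are below) =====
def Claim_equal_group_by_scenario : Prop := ∀ (data : List (List (String × Int))), Dom_group_by_scenario data → Spec_group_by_scenario data (group_by_scenario data)

-- ===== LEMMAS AND PROOFS =====

theorem classify_cases (e : List (String × Int)) :
    classify_scenario e = SCENARIO_BASELINE ∨ classify_scenario e = SCENARIO_20_TOOLS ∨
    classify_scenario e = SCENARIO_8_TOOLS ∨ classify_scenario e = SCENARIO_7_TOOLS := by
  simp only [classify_scenario]
  split_ifs <;> tauto

theorem foldl_buckets (data : List (List (String × Int)))
    (a1 a2 a3 a4 : List (List (String × Int))) :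
    (data.foldl (fun g e => g.modify (classify_scenario e) [] (· ++ [e]))
        (PySem.Dict.mk [(SCENARIO_BASELINE, a1), (SCENARIO_20_TOOLS, a2),
                        (SCENARIO_8_TOOLS, a3), (SCENARIO_7_TOOLS, a4)])).items =
      [(SCENARIO_BASELINE, a1 ++ data.filter (fun e => classify_scenario e == SCENARIO_BASELINE)),
       (SCENARIO_20_TOOLS, a2 ++ data.filter (fun e => classify_scenario e == SCENARIO_20_TOOLS)),
       (SCENARIO_8_TOOLS, a3 ++ data.filter (fun e => classify_scenario e == SCENARIO_8_TOOLS)),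
       (SCENARIO_7_TOOLS, a4 ++ data.filter (fun e => classify_scenario e == SCENARIO_7_TOOLS))] := by
  induction data generalizing a1 a2 a3 a4 with
  | nil => simp
  | cons e rest ih =>
    rcases classify_cases e with h | h | h | h
    · simp only [List.foldl_cons, List.filter_cons, h]
      rw [show (PySem.Dict.mk [(SCENARIO_BASELINE, a1), (SCENARIO_20_TOOLS, a2),
            (SCENARIO_8_TOOLS, a3), (SCENARIO_7_TOOLS, a4)]).modify SCENARIO_BASELINE [] (· ++ [e])
          = PySem.Dict.mk [(SCENARIO_BASELINE, a1 ++ [e]), (SCENARIO_20_TOOLS, a2),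
            (SCENARIO_8_TOOLS, a3), (SCENARIO_7_TOOLS, a4)] from rfl, ih]
      simp [SCENARIO_BASELINE, SCENARIO_20_TOOLS, SCENARIO_8_TOOLS, SCENARIO_7_TOOLS]
    · simp only [List.foldl_cons, List.filter_cons, h]
      rw [show (PySem.Dict.mk [(SCENARIO_BASELINE, a1), (SCENARIO_20_TOOLS, a2),
            (SCENARIO_8_TOOLS, a3), (SCENARIO_7_TOOLS, a4)]).modify SCENARIO_20_TOOLS [] (· ++ [e])
          = PySem.Dict.mk [(SCENARIO_BASELINE, a1), (SCENARIO_20_TOOLS, a2 ++ [e]),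
            (SCENARIO_8_TOOLS, a3), (SCENARIO_7_TOOLS, a4)] from rfl, ih]
      simp [SCENARIO_BASELINE, SCENARIO_20_TOOLS, SCENARIO_8_TOOLS, SCENARIO_7_TOOLS]
    · simp only [List.foldl_cons, List.filter_cons, h]
      rw [show (PySem.Dict.mk [(SCENARIO_BASELINE, a1), (SCENARIO_20_TOOLS, a2),
            (SCENARIO_8_TOOLS, a3), (SCENARIO_7_TOOLS, a4)]).modify SCENARIO_8_TOOLS [] (· ++ [e])
          = PySem.Dict.mk [(SCENARIO_BASELINE, a1), (SCENARIO_20_TOOLS, a2),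
            (SCENARIO_8_TOOLS, a3 ++ [e]), (SCENARIO_7_TOOLS, a4)] from rfl, ih]
      simp [SCENARIO_BASELINE, SCENARIO_20_TOOLS, SCENARIO_8_TOOLS, SCENARIO_7_TOOLS]
    · simp only [List.foldl_cons, List.filter_cons, h]
      rw [show (PySem.Dict.mk [(SCENARIO_BASELINE, a1), (SCENARIO_20_TOOLS, a2),
            (SCENARIO_8_TOOLS, a3), (SCENARIO_7_TOOLS, a4)]).modify SCENARIO_7_TOOLS [] (· ++ [e])
          = PySem.Dict.mk [(SCENARIO_BASELINE, a1), (SCENARIO_20_TOOLS, a2),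
            (SCENARIO_8_TOOLS, a3), (SCENARIO_7_TOOLS, a4 ++ [e])] from rfl, ih]
      simp [SCENARIO_BASELINE, SCENARIO_20_TOOLS, SCENARIO_8_TOOLS, SCENARIO_7_TOOLS]

-- ===== VERDICT (by name: the statement is the Claim_ definition above) =====
theorem group_by_scenario_spec : Claim_equal_group_by_scenario := by
  intro data _
  unfold Spec_group_by_scenario group_by_scenario group_by_scenario_alt
  have h := foldl_buckets data [] [] [] []
  simpa using h
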